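-- pv_equiv track=rewrite | github.com/sangho-vision/acav100m | correspondence_retrieval/code/derangement/common.py | categorize_data
-- ===== SOURCE A (Python) =====
-- from collections import defaultdict
--
-- def categorize_data(data, add_vid=False):
--     classes = defaultdict(dict)
--     for vid, datum in data.items():
--         if add_vid:
--             datum = {**datum, 'vid': vid}
--         classes[datum['label']][vid] = datum
--     for label, class_dt in classes.items():
--         keys = sorted(list(class_dt.keys()))
--         classes[label] = [class_dt[key] for key in keys]
--     return classes
-- ===== SOURCE B (Python) =====
-- # B: instead of grouping into per-label dicts keyed by vid and sorting each
-- # group's keys afterwards (A), build the flat (datum, vid) item list once,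
-- # record the label order with setdefault, sort the WHOLE item list by vid
-- # once, and distribute the already-sorted items into per-label lists.
-- from collections import defaultdict
--
--
-- def categorize_data(data, add_vid=False):
--     items = [({**d, 'vid': v} if add_vid else d, v) for v, d in data.items()]
--     out = defaultdict(dict)
--     for datum, _ in items:
--         out.setdefault(datum['label'], [])
--     for datum, _ in sorted(items, key=lambda p: p[1]):
--         out[datum['label']].append(datum)
--     return out
-- ===== Notes on version B (the rewrite author's own statement) =====
-- stated objective: alternative
-- what changed: A groups items into per-label dicts keyed by vid and then sorts each group's key list and re-looks every datum up; B flattens data to a (datum, vid) list, fixes the label order with one setdefault pass, sorts the whole list by vid once, and appends each datum to its label's list in one pass, with no inner dicts and no per-group sorting or lookups.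
import Mathlib
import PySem

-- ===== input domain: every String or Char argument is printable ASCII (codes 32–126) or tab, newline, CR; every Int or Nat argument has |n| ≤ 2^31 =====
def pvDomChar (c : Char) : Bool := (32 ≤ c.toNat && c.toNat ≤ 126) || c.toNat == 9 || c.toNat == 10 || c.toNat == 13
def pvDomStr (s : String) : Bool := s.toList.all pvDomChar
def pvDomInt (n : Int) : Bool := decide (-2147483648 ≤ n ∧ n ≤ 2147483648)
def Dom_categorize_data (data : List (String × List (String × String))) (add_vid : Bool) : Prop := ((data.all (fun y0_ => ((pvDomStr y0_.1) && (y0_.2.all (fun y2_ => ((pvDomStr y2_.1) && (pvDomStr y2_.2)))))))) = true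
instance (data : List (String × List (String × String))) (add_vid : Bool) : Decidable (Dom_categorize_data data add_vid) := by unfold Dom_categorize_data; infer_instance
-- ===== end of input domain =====

-- B groups by one global sort over (datum, vid) pairs instead of A's per-label dicts with a
-- per-group key sort; equivalence is about the RETURN value (neither mutates its argument).
-- Both ports decode the dict-typed inputs with PySem.Dict.ofList (Python's dict(pairs) semantics).

-- ===== PORT A =====
def categorize_data (data : List (String × List (String × String))) (add_vid : Bool) : List (String × List (List (String × String))) :=
  let classes : PySem.Dict String (PySem.Dict String (List (String × String))) :=
    (PySem.Dict.ofList data).items.foldl (fun classes p =>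
      let datum : PySem.Dict String String :=
        if add_vid then (PySem.Dict.ofList p.2).insert "vid" p.1 else PySem.Dict.ofList p.2
      match datum.get? "label" with
      | none => classes   -- Python raises KeyError here; excluded by Pre_
      | some label => classes.insert label ((classes.getD label PySem.Dict.empty).insert p.1 datum.items))
      PySem.Dict.empty
  classes.items.map (fun q =>
    (q.1, (PySem.List.sorted q.2.keys (fun k => k) false).map (fun k => q.2.getD k [])))

-- ===== PORT B =====
def categorize_data_alt (data : List (String × List (String × String))) (add_vid : Bool) : List (String × List (List (String × String))) :=
  let items : List (List (String × String) × String) :=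
    (PySem.Dict.ofList data).items.map (fun p =>
      ((if add_vid then (PySem.Dict.ofList p.2).insert "vid" p.1 else PySem.Dict.ofList p.2).items, p.1))
  let out0 : PySem.Dict String (List (List (String × String))) :=
    items.foldl (fun out q =>
      match (PySem.Dict.mk q.1).get? "label" with
      | none => out   -- Python raises KeyError here; excluded by Pre_
      | some lab => out.setdefault lab []) PySem.Dict.empty
  let out := (PySem.List.sorted items (fun q => q.2) false).foldl (fun out q =>
      match (PySem.Dict.mk q.1).get? "label" with
      | none => out
      | some lab => out.modify lab [] (fun xs => xs ++ [q.1])) out0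
  out.items

-- ===== PRECONDITION & SPEC =====
-- Pre_ excludes exactly the inputs where some datum of the (decoded) dict lacks the key
-- 'label', on which Python's A raises KeyError.
def Pre_categorize_data (data : List (String × List (String × String))) (add_vid : Bool) : Prop :=
  ∀ p ∈ (PySem.Dict.ofList data).items, (PySem.Dict.ofList p.2).contains "label" = true
instance (data : List (String × List (String × String))) (add_vid : Bool) : Decidable (Pre_categorize_data data add_vid) := by unfold Pre_categorize_data; infer_instance

def pvWitness_categorize_data : (List (String × List (String × String))) × Bool :=
  ([("v2", [("label", "x"), ("a", "1")]), ("v1", [("label", "y")])], true)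

def Spec_categorize_data (data : List (String × List (String × String))) (add_vid : Bool) (out : List (String × List (List (String × String)))) : Prop := out = categorize_data_alt data add_vid
instance (data : List (String × List (String × String))) (add_vid : Bool) (out : List (String × List (List (String × String)))) : Decidable (Spec_categorize_data data add_vid out) := by unfold Spec_categorize_data; infer_instance

-- ===== CLAIM (what is proved, stated in full; the proofs are below) =====
def Claim_equal_categorize_data : Prop := ∀ (data : List (String × List (String × String))) (add_vid : Bool), Dom_categorize_data data add_vid → Pre_categorize_data data add_vid → Spec_categorize_data data add_vid (categorize_data data add_vid)

-- ===== LEMMAS AND PROOFS =====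

-- the wrapped datum ({**datum,'vid':vid} when add_vid) and its label, as both ports compute them
def pvWrap (add_vid : Bool) (p : String × List (String × String)) : PySem.Dict String String :=
  if add_vid then (PySem.Dict.ofList p.2).insert "vid" p.1 else PySem.Dict.ofList p.2
def pvLab (p : String × List (String × String)) : String :=
  ((PySem.Dict.ofList p.2).get? "label").getD ""

lemma pvWrap_get_label (add_vid : Bool) (p : String × List (String × String)) :
    (pvWrap add_vid p).get? "label" = (PySem.Dict.ofList p.2).get? "label" := by
  unfold pvWrap
  cases add_vid with
  | false => rfl
  | true => exact PySem.Dict.get?_insert_of_ne _ _ (by decide)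

lemma pvWrap_get_label_some (add_vid : Bool) (p : String × List (String × String))
    (h : (PySem.Dict.ofList p.2).contains "label" = true) :
    (pvWrap add_vid p).get? "label" = some (pvLab p) := by
  rw [pvWrap_get_label]
  rw [PySem.Dict.contains_eq_isSome_get?] at h
  unfold pvLab
  cases hg : (PySem.Dict.ofList p.2).get? "label" with
  | none => rw [hg] at h; simp at h
  | some l => rfl

-- A's grouping fold, read off one label
lemma getD_group_fold (l : List (String × List (String × String))) (add_vid : Bool)
    (d : PySem.Dict String (PySem.Dict String (List (String × String)))) (c : String) :
    (l.foldl (fun cls p => cls.insert (pvLab p)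
        ((cls.getD (pvLab p) PySem.Dict.empty).insert p.1 (pvWrap add_vid p).items)) d).getD c PySem.Dict.empty
      = (l.filter (fun p => pvLab p == c)).foldl
          (fun e p => e.insert p.1 (pvWrap add_vid p).items) (d.getD c PySem.Dict.empty) := by
  induction l generalizing d with
  | nil => rfl
  | cons p t ih =>
    simp only [List.foldl_cons, List.filter_cons]
    rw [ih]
    by_cases hc : pvLab p = c
    · simp [hc]
    · simp [hc, PySem.Dict.getD_insert, Ne.symm hc]

-- B's setdefault pass: every stored value is [], so getD _ [] is []
lemma getD_setdefault_fold {β : Type} (l : List β) (key : β → String)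
    (d : PySem.Dict String (List (List (String × String))))
    (hd : ∀ c, d.getD c [] = []) (c : String) :
    (l.foldl (fun out q => out.setdefault (key q) []) d).getD c [] = [] := by
  induction l generalizing d with
  | nil => exact hd c
  | cons x t ih =>
    refine ih _ (fun c' => ?_)
    show (d.setdefault (key x) []).getD c' [] = []
    by_cases hx : d.contains (key x) = true
    · rw [PySem.Dict.setdefault_of_contains _ _ hx]; exact hd c'
    · rw [PySem.Dict.setdefault_of_not_contains _ _ (by simpa using hx),
        PySem.Dict.getD_insert]
      split
      · rfl
      · exact hd c'

-- B's setdefault pass: keys, like an insert loop, collect first occurrences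
lemma keys_setdefault_fold {β : Type} (l : List β) (key : β → String)
    (d : PySem.Dict String (List (List (String × String)))) :
    (l.foldl (fun out q => out.setdefault (key q) []) d).keys
      = PySem.Set.update d.keys (l.map key) := by
  induction l generalizing d with
  | nil => rfl
  | cons x t ih =>
    have hstep : (d.setdefault (key x) []).keys = PySem.Set.add d.keys (key x) := by
      by_cases hx : d.contains (key x) = true
      · rw [PySem.Dict.setdefault_of_contains _ _ hx]
        unfold PySem.Set.add
        rw [if_pos]
        rw [PySem.Dict.contains_iff_mem_keys] at hx
        simpa [PySem.Set.contains] using hx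
      · rw [PySem.Dict.setdefault_of_not_contains _ _ (by simpa using hx),
          PySem.Dict.keys_insert_of_not_contains _ _ (by simpa using hx)]
        unfold PySem.Set.add
        rw [if_neg]
        rw [PySem.Dict.contains_iff_mem_keys] at hx
        simpa [PySem.Set.contains] using hx
    simp only [List.foldl_cons, List.map_cons]
    rw [ih, hstep]
    rfl

lemma nodup_keys_setdefault_fold {β : Type} (l : List β) (key : β → String)
    (d : PySem.Dict String (List (List (String × String)))) (hd : d.keys.Nodup) :
    (l.foldl (fun out q => out.setdefault (key q) []) d).keys.Nodup := by
  induction l generalizing d with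
  | nil => exact hd
  | cons x t ih =>
    refine ih _ ?_
    show (d.setdefault (key x) []).keys.Nodup
    by_cases hx : d.contains (key x) = true
    · rw [PySem.Dict.setdefault_of_contains _ _ hx]; exact hd
    · rw [PySem.Dict.setdefault_of_not_contains _ _ (by simpa using hx)]
      exact PySem.Dict.nodup_keys_insert _ _ _ hd

-- Set.update by elements already present does nothing
lemma set_update_of_subset (s : PySem.Set String) (l : List String)
    (h : ∀ x ∈ l, x ∈ s) : PySem.Set.update s l = s := by
  induction l generalizing s with
  | nil => rfl
  | cons x t ih =>
    show PySem.Set.update (PySem.Set.add s x) t = s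
    have hx : PySem.Set.add s x = s := by
      unfold PySem.Set.add
      rw [if_pos]
      simpa [PySem.Set.contains] using h x (by simp)
    rw [hx]
    exact ih s (fun y hy => h y (by simp [hy]))

-- Pairwise ≤ on a Nodup projection is Pairwise <
lemma pairwise_lt_of_pairwise_le_nodup {α : Type} (l : List α) (key : α → String)
    (hle : List.Pairwise (fun a b => key a ≤ key b) l) (hnd : (l.map key).Nodup) :
    List.Pairwise (fun a b => key a < key b) l := by
  have hne : List.Pairwise (fun a b => key a ≠ key b) l := List.pairwise_map.mp hnd
  exact (hle.and hne).imp (fun h => lt_of_le_of_ne h.1 h.2)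

-- the label of a B-side item
def pvLabI (q : List (String × String) × String) : String :=
  ((PySem.Dict.mk q.1).get? "label").getD ""

lemma pvLabI_wrap (add_vid : Bool) (p : String × List (String × String)) :
    pvLabI ((pvWrap add_vid p).items, p.1) = pvLab p := by
  unfold pvLabI pvLab
  rw [show PySem.Dict.mk (pvWrap add_vid p).items = pvWrap add_vid p from rfl, pvWrap_get_label]

-- the vids of one label's group, with their wrapped datums, in data order / in sorted order
def pvGroup (add_vid : Bool) (l : List (String × List (String × String))) (c : String) :
    List (String × List (String × String)) :=
  (l.filter (fun p => pvLab p == c)).map (fun p => (p.1, (pvWrap add_vid p).items))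
def pvSortedGroup (add_vid : Bool) (l : List (String × List (String × String))) (c : String) :
    List (String × List (String × String)) :=
  PySem.List.sorted (pvGroup add_vid l c) (fun r => r.1) false

lemma nodup_group_fst (add_vid : Bool) (l : List (String × List (String × String))) (c : String)
    (hnd : (l.map (fun p => p.1)).Nodup) :
    ((pvGroup add_vid l c).map (fun r => r.1)).Nodup := by
  unfold pvGroup
  rw [List.map_map]
  exact List.Sublist.nodup (List.Sublist.map _ (List.filter_sublist)) hnd

lemma sortedGroup_perm (add_vid : Bool) (l : List (String × List (String × String))) (c : String) :
    (pvSortedGroup add_vid l c).Perm (pvGroup add_vid l c) :=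
  PySem.List.sorted_perm _ _ _

lemma sortedGroup_pairwise_lt (add_vid : Bool) (l : List (String × List (String × String)))
    (c : String) (hnd : (l.map (fun p => p.1)).Nodup) :
    List.Pairwise (fun a b => a.1 < b.1) (pvSortedGroup add_vid l c) := by
  refine pairwise_lt_of_pairwise_le_nodup _ (fun r : String × List (String × String) => r.1)
    (PySem.List.sorted_pairwise _ _) ?_
  exact ((sortedGroup_perm add_vid l c).map _).nodup_iff.mpr (nodup_group_fst add_vid l c hnd)

-- A computes, per label, the sorted group's datums
lemma A_char (add_vid : Bool) (l : List (String × List (String × String)))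
    (hnd : (l.map (fun p => p.1)).Nodup)
    (hlab : ∀ p ∈ l, (PySem.Dict.ofList p.2).contains "label" = true) :
    (l.foldl (fun classes p =>
        match (pvWrap add_vid p).get? "label" with
        | none => classes
        | some label => classes.insert label
            ((classes.getD label PySem.Dict.empty).insert p.1 (pvWrap add_vid p).items))
        PySem.Dict.empty).items.map (fun q =>
      (q.1, (PySem.List.sorted q.2.keys (fun k => k) false).map (fun k => q.2.getD k [])))
    = (PySem.Set.ofList (l.map pvLab)).map
        (fun c => (c, (pvSortedGroup add_vid l c).map (fun r => r.2))) := by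
  have hsomeW : ∀ p ∈ l, (pvWrap add_vid p).get? "label" = some (pvLab p) :=
    fun p hp => pvWrap_get_label_some add_vid p (hlab p hp)
  rw [PySem.List.foldl_congr_mem l _ (fun cls p => cls.insert (pvLab p)
      ((cls.getD (pvLab p) PySem.Dict.empty).insert p.1 (pvWrap add_vid p).items))
      PySem.Dict.empty (fun acc p hp => by rw [hsomeW p hp])]
  have hkeys : (l.foldl (fun cls p => cls.insert (pvLab p)
      ((cls.getD (pvLab p) PySem.Dict.empty).insert p.1 (pvWrap add_vid p).items))
      PySem.Dict.empty).keys = PySem.Set.ofList (l.map pvLab) := by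
    rw [PySem.Dict.keys_foldl_insert_key l pvLab
      (fun d x => (d.getD (pvLab x) PySem.Dict.empty).insert x.1 (pvWrap add_vid x).items)
      PySem.Dict.empty, PySem.Set.ofList_eq_foldl]
    rfl
  have hnodk : (l.foldl (fun cls p => cls.insert (pvLab p)
      ((cls.getD (pvLab p) PySem.Dict.empty).insert p.1 (pvWrap add_vid p).items))
      PySem.Dict.empty).keys.Nodup :=
    PySem.Dict.nodup_keys_foldl_insert_key l pvLab _ _ PySem.Dict.nodup_keys_empty
  rw [PySem.Dict.items_eq_map_keys _ hnodk PySem.Dict.empty, hkeys, List.map_map]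
  apply List.map_congr_left
  intro c _hc
  simp only [Function.comp]
  have hgd : (l.foldl (fun cls p => cls.insert (pvLab p)
      ((cls.getD (pvLab p) PySem.Dict.empty).insert p.1 (pvWrap add_vid p).items))
      PySem.Dict.empty).getD c PySem.Dict.empty
      = (l.filter (fun p => pvLab p == c)).foldl
          (fun e p => e.insert p.1 (pvWrap add_vid p).items) PySem.Dict.empty := by
    rw [getD_group_fold l add_vid PySem.Dict.empty c, PySem.Dict.getD_empty]
  rw [hgd]
  have hndf : ((l.filter (fun p => pvLab p == c)).map (fun p => p.1)).Nodup :=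
    List.Sublist.nodup (List.Sublist.map _ List.filter_sublist) hnd
  have hitems : ((l.filter (fun p => pvLab p == c)).foldl
      (fun e p => e.insert p.1 (pvWrap add_vid p).items) PySem.Dict.empty).items
      = pvGroup add_vid l c := by
    rw [PySem.Dict.items_foldl_insert_fresh _ (fun p => p.1)
      (fun p => (pvWrap add_vid p).items) PySem.Dict.empty
      (fun a _ => PySem.Dict.contains_empty _) hndf]
    simp [pvGroup]
    rfl
  have hk2 : ((l.filter (fun p => pvLab p == c)).foldl
      (fun e p => e.insert p.1 (pvWrap add_vid p).items) PySem.Dict.empty).keys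
      = (pvGroup add_vid l c).map (fun r => r.1) := congrArg (List.map _) hitems
  have hsorted : PySem.List.sorted ((pvGroup add_vid l c).map (fun r => r.1)) (fun k => k) false
      = (pvSortedGroup add_vid l c).map (fun r => r.1) := by
    apply PySem.List.sorted_eq_of_perm_of_pairwise_lt
    · exact (sortedGroup_perm add_vid l c).map _
    · exact List.pairwise_map.mpr (sortedGroup_pairwise_lt add_vid l c hnd)
  refine congrArg (Prod.mk c) ?_
  rw [hk2, hsorted, List.map_map]
  apply List.map_congr_left
  intro r hr
  have hrW : r ∈ pvGroup add_vid l c := (sortedGroup_perm add_vid l c).subset hr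
  have hmem : (r.1, r.2) ∈ ((l.filter (fun p => pvLab p == c)).foldl
      (fun e p => e.insert p.1 (pvWrap add_vid p).items) PySem.Dict.empty).items := by
    rw [hitems]; simpa using hrW
  have hndk : ((l.filter (fun p => pvLab p == c)).foldl
      (fun e p => e.insert p.1 (pvWrap add_vid p).items) PySem.Dict.empty).keys.Nodup := by
    rw [hk2]; exact nodup_group_fst add_vid l c hnd
  exact PySem.Dict.getD_of_mem_items _ hmem hndk []

-- one pass of appends through modify, read off one label
lemma getD_modify_append_fold {β : Type} (l : List β) (key : β → String)
    (v : β → List (String × String))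
    (d : PySem.Dict String (List (List (String × String)))) (c : String) :
    (l.foldl (fun out q => out.modify (key q) [] (fun xs => xs ++ [v q])) d).getD c []
      = d.getD c [] ++ (l.filter (fun q => key q == c)).map v := by
  induction l generalizing d with
  | nil => simp
  | cons q t ih =>
    simp only [List.foldl_cons, List.filter_cons]
    rw [ih]
    by_cases hc : key q = c
    · simp [hc]
    · simp [hc, PySem.Dict.getD_modify, Ne.symm hc]

-- B's one global sort, filtered to one label, is that label's sorted group (vid next to datum)
lemma B_group (add_vid : Bool) (l : List (String × List (String × String))) (c : String)
    (hnd : (l.map (fun p => p.1)).Nodup) :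
    (PySem.List.sorted (l.map (fun p => ((pvWrap add_vid p).items, p.1))) (fun q => q.2)
        false).filter (fun q => pvLabI q == c)
      = (pvSortedGroup add_vid l c).map (fun r => (r.2, r.1)) := by
  have hfilter : (l.map (fun p => ((pvWrap add_vid p).items, p.1))).filter (fun q => pvLabI q == c)
      = (pvGroup add_vid l c).map (fun r => (r.2, r.1)) := by
    rw [List.filter_map]
    have h1 : ((fun q => pvLabI q == c) ∘ (fun p => ((pvWrap add_vid p).items, p.1)))
        = (fun p => pvLab p == c) := by
      funext p
      simp [Function.comp, pvLabI_wrap]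
    rw [h1]
    unfold pvGroup
    rw [List.map_map]
    rfl
  have hperm : ((PySem.List.sorted (l.map (fun p => ((pvWrap add_vid p).items, p.1)))
      (fun q => q.2) false).filter (fun q => pvLabI q == c)).Perm
      ((pvGroup add_vid l c).map (fun r => (r.2, r.1))) := by
    rw [← hfilter]
    exact (PySem.List.sorted_perm _ _ _).filter _
  have hndsnd : (((PySem.List.sorted (l.map (fun p => ((pvWrap add_vid p).items, p.1)))
      (fun q => q.2) false).filter (fun q => pvLabI q == c)).map (fun q => q.2)).Nodup := by
    refine List.Sublist.nodup (List.Sublist.map _ List.filter_sublist) ?_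
    refine ((PySem.List.sorted_perm _ _ _).map _).nodup_iff.mpr ?_
    rw [List.map_map]
    exact hnd
  have hpl : List.Pairwise (fun a b => a.2 < b.2)
      ((PySem.List.sorted (l.map (fun p => ((pvWrap add_vid p).items, p.1)))
        (fun q => q.2) false).filter (fun q => pvLabI q == c)) :=
    pairwise_lt_of_pairwise_le_nodup _ (fun q : List (String × String) × String => q.2)
      (List.Pairwise.sublist List.filter_sublist (PySem.List.sorted_pairwise _ _)) hndsnd
  have hsortF : PySem.List.sorted ((pvGroup add_vid l c).map (fun r => (r.2, r.1)))
      (fun q => q.2)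
      = (PySem.List.sorted (l.map (fun p => ((pvWrap add_vid p).items, p.1)))
        (fun q => q.2) false).filter (fun q => pvLabI q == c) :=
    PySem.List.sorted_eq_of_perm_of_pairwise_lt _ _ _ hperm hpl
  have hsortS : PySem.List.sorted ((pvGroup add_vid l c).map (fun r => (r.2, r.1)))
      (fun q => q.2)
      = (pvSortedGroup add_vid l c).map (fun r => (r.2, r.1)) := by
    refine PySem.List.sorted_eq_of_perm_of_pairwise_lt _ _ _
      ((sortedGroup_perm add_vid l c).map _) ?_
    exact List.pairwise_map.mpr (sortedGroup_pairwise_lt add_vid l c hnd)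
  rw [← hsortF, hsortS]

-- B computes the same value
lemma B_char (add_vid : Bool) (l : List (String × List (String × String)))
    (hnd : (l.map (fun p => p.1)).Nodup)
    (hlab : ∀ p ∈ l, (PySem.Dict.ofList p.2).contains "label" = true) :
    (((PySem.List.sorted (l.map (fun p => ((pvWrap add_vid p).items, p.1))) (fun q => q.2) false).foldl
        (fun out q =>
          match (PySem.Dict.mk q.1).get? "label" with
          | none => out
          | some lab => out.modify lab [] (fun xs => xs ++ [q.1]))
        ((l.map (fun p => ((pvWrap add_vid p).items, p.1))).foldl (fun out q =>
          match (PySem.Dict.mk q.1).get? "label" with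
          | none => out
          | some lab => out.setdefault lab [])
          (PySem.Dict.empty : PySem.Dict String (List (List (String × String)))))).items)
    = (PySem.Set.ofList (l.map pvLab)).map
        (fun c => (c, (pvSortedGroup add_vid l c).map (fun r => r.2))) := by
  have hsomeW : ∀ p ∈ l, (pvWrap add_vid p).get? "label" = some (pvLab p) :=
    fun p hp => pvWrap_get_label_some add_vid p (hlab p hp)
  have hqsome : ∀ q ∈ l.map (fun p => ((pvWrap add_vid p).items, p.1)),
      (PySem.Dict.mk q.1).get? "label" = some (pvLabI q) := by
    intro q hq
    rcases List.mem_map.mp hq with ⟨p, hp, rfl⟩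
    rw [show PySem.Dict.mk ((pvWrap add_vid p).items, p.1).1 = pvWrap add_vid p from rfl,
      hsomeW p hp, pvLabI_wrap add_vid p]
  have hqsome' : ∀ q ∈ PySem.List.sorted (l.map (fun p => ((pvWrap add_vid p).items, p.1)))
      (fun q => q.2) false, (PySem.Dict.mk q.1).get? "label" = some (pvLabI q) :=
    fun q hq => hqsome q ((PySem.List.sorted_perm _ _ _).subset hq)
  rw [PySem.List.foldl_congr_mem _ _ (fun out q => out.setdefault (pvLabI q) [])
      PySem.Dict.empty (fun acc q hq => by rw [hqsome q hq]),
    PySem.List.foldl_congr_mem _ _ (fun out q => out.modify (pvLabI q) [] (fun xs => xs ++ [q.1]))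
      _ (fun acc q hq => by rw [hqsome' q hq])]
  have hmapLab : (l.map (fun p => ((pvWrap add_vid p).items, p.1))).map pvLabI = l.map pvLab := by
    rw [List.map_map]
    exact List.map_congr_left (fun p _ => pvLabI_wrap add_vid p)
  have hkeys0 : ((l.map (fun p => ((pvWrap add_vid p).items, p.1))).foldl
      (fun out q => out.setdefault (pvLabI q) [])
        (PySem.Dict.empty : PySem.Dict String (List (List (String × String))))).keys
      = PySem.Set.ofList (l.map pvLab) := by
    rw [keys_setdefault_fold _ pvLabI PySem.Dict.empty, hmapLab, PySem.Set.ofList_eq_foldl]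
    rfl
  have hnod0 : ((l.map (fun p => ((pvWrap add_vid p).items, p.1))).foldl
      (fun out q => out.setdefault (pvLabI q) [])
        (PySem.Dict.empty : PySem.Dict String (List (List (String × String))))).keys.Nodup :=
    nodup_keys_setdefault_fold _ pvLabI PySem.Dict.empty PySem.Dict.nodup_keys_empty
  have hgd0 : ∀ c, ((l.map (fun p => ((pvWrap add_vid p).items, p.1))).foldl
      (fun out q => out.setdefault (pvLabI q) [])
        (PySem.Dict.empty : PySem.Dict String (List (List (String × String))))).getD c [] = [] :=
    getD_setdefault_fold _ pvLabI PySem.Dict.empty (fun c => PySem.Dict.getD_empty _ _)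
  have hkeysOut : ((PySem.List.sorted (l.map (fun p => ((pvWrap add_vid p).items, p.1)))
      (fun q => q.2) false).foldl
      (fun out q => out.modify (pvLabI q) [] (fun xs => xs ++ [q.1]))
      ((l.map (fun p => ((pvWrap add_vid p).items, p.1))).foldl
        (fun out q => out.setdefault (pvLabI q) [])
        (PySem.Dict.empty : PySem.Dict String (List (List (String × String)))))).keys
      = PySem.Set.ofList (l.map pvLab) := by
    rw [PySem.Dict.keys_foldl_modify_key _ pvLabI []
      (fun d q xs => xs ++ [q.1]) _, hkeys0]
    apply set_update_of_subset
    intro x hx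
    rcases List.mem_map.mp hx with ⟨q, hq, rfl⟩
    rw [PySem.Set.mem_ofList, ← hmapLab]
    exact List.mem_map_of_mem ((PySem.List.sorted_perm _ _ _).subset hq)
  have hnodOut : ((PySem.List.sorted (l.map (fun p => ((pvWrap add_vid p).items, p.1)))
      (fun q => q.2) false).foldl
      (fun out q => out.modify (pvLabI q) [] (fun xs => xs ++ [q.1]))
      ((l.map (fun p => ((pvWrap add_vid p).items, p.1))).foldl
        (fun out q => out.setdefault (pvLabI q) [])
        (PySem.Dict.empty : PySem.Dict String (List (List (String × String)))))).keys.Nodup := by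
    have := hkeys0 ▸ hnod0
    rw [hkeysOut]
    exact this
  rw [PySem.Dict.items_eq_map_keys _ hnodOut [], hkeysOut]
  apply List.map_congr_left
  intro c _hc
  refine congrArg (Prod.mk c) ?_
  rw [getD_modify_append_fold _ pvLabI (fun q => q.1) _ c, hgd0 c, List.nil_append, B_group add_vid l c hnd,
    List.map_map]
  rfl

theorem categorize_data_spec : Claim_equal_categorize_data := by
  intro data add_vid _hdom hpre
  unfold Spec_categorize_data categorize_data categorize_data_alt
  exact (A_char add_vid (PySem.Dict.ofList data).items
      (PySem.Dict.nodup_keys_ofList data) hpre).trans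
    (B_char add_vid (PySem.Dict.ofList data).items
      (PySem.Dict.nodup_keys_ofList data) hpre).symm
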